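-- pv_equiv track=rewrite | github.com/Kshitij-Ambilduke/games_python | 2048.py | final_left
-- ===== SOURCE A (Python) =====
-- def shift_left(grid):
-- 	for row in grid:
-- 		for i in range(len(grid)-1):
-- 			if row[i]==0:
-- 				row[i],row[i+1]=row[i+1],row[i]
-- 	return(grid)
--
-- def final_left(grid):
-- 	for i in range(len(grid)):
-- 		grid=shift_left(grid)
--
-- 	for row in grid:
-- 		for i in range(len(row)-1):
-- 			if row[i]==row[i+1]:
-- 				row[i]=2*row[i]
-- 				row[i+1]=0
--
-- 	for i in range(len(grid)):
-- 		grid=shift_left(grid)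
-- 	return grid
-- ===== SOURCE B (Python) =====
-- # B: validate the square grid, then a single pass per row -- compact the
-- # non-zeros, merge adjacent equal pairs left-to-right, pad with zeros.
-- # Pure (does not mutate the argument, unlike A, which rewrites the rows in
-- # place); equivalence is about the return value.
-- def final_left(grid):
--     n = len(grid)
--     if any(len(row) != n for row in grid):
--         raise ValueError("grid must be square")
--     out = []
--     for row in grid:
--         tiles = [x for x in row if x != 0]
--         merged = []
--         i = 0
--         while i < len(tiles):
--             if i + 1 < len(tiles) and tiles[i] == tiles[i + 1]:
--                 merged.append(2 * tiles[i])
--                 i += 2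
--             else:
--                 merged.append(tiles[i])
--                 i += 1
--         out.append(merged + [0] * (n - len(merged)))
--     return out
-- ===== Notes on version B (the rewrite author's own statement) =====
-- stated objective: faster
-- what changed: A compacts each row by running n full bubble passes of zero-swaps before and after its merge pass (O(n^3) for an n x n grid); B validates that the grid is square and then does a single pass per row: filter out zeros, merge adjacent equal tiles left-to-right, pad with zeros (O(n^2)). B is pure and does not mutate the grid in place as A does (return-value equivalence). …
-- outside the precondition, e.g. on final_left([[0, 2]]): A returns [[0, 2]], B raises ValueError; on final_left([[2, 2, 4], [1, 2, 3]]): A returns [[4, 0, 4], [1, 2, 3]], B raises ValueError; on final_left([[0], [0]]): A raises IndexError, B raises ValueError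
import Mathlib
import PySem

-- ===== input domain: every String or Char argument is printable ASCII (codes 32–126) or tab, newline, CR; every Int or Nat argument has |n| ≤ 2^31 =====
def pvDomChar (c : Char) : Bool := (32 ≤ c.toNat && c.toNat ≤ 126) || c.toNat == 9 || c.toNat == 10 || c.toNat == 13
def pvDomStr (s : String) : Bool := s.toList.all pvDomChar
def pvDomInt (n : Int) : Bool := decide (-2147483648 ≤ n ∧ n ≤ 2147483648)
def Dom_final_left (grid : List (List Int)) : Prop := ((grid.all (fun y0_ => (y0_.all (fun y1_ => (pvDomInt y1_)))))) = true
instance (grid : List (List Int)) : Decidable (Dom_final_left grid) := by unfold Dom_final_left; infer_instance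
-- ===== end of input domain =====

-- B replaces A's n repeated bubble passes per row by one filter/merge/pad pass (asymptotically faster);
-- A mutates its argument's rows in place, B is pure — the equivalence proved is about the return value.

-- ===== PORT A =====
-- one execution of shift_left's inner loop 'for i in range(len(grid)-1)' on one row;
-- the fuel is the number of remaining iterations.  The two fallback cases are where
-- Python raises IndexError (row shorter than len(grid)); they are excluded by Pre_.
def onePass : Nat → List Int → List Int
  | 0, xs => xs
  | _ + 1, [] => []
  | _ + 1, [x] => [x]
  | k + 1, x :: y :: rest =>
      if x = 0 then y :: onePass k (x :: rest) else x :: onePass k (y :: rest)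

def shift_left (grid : List (List Int)) : List (List Int) :=
  grid.map (fun row => onePass (grid.length - 1) row)

-- the merge loop 'for i in range(len(row)-1)' of final_left on one row (fuel = remaining iterations)
def mergePass : Nat → List Int → List Int
  | 0, xs => xs
  | _ + 1, [] => []
  | _ + 1, [x] => [x]
  | k + 1, x :: y :: rest =>
      if x = y then (2 * x) :: mergePass k (0 :: rest) else x :: mergePass k (y :: rest)

def final_left (grid : List (List Int)) : List (List Int) :=
  let g1 := (List.range grid.length).foldl (fun g _ => shift_left g) grid
  let g2 := g1.map (fun row => mergePass (row.length - 1) row)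
  (List.range g2.length).foldl (fun g _ => shift_left g) g2

-- ===== PORT B =====
-- Source B first validates that the grid is square and raises ValueError otherwise; that
-- branch returns no value and lies outside Pre_, so the port carries only the value path.
-- Source B's while loop: merge adjacent equal tiles left-to-right, consuming two on a merge
def merge2048 : List Int → List Int
  | [] => []
  | [x] => [x]
  | x :: y :: rest =>
      if x = y then (2 * x) :: merge2048 rest else x :: merge2048 (y :: rest)

def final_left_alt (grid : List (List Int)) : List (List Int) :=
  grid.map (fun row =>
    let tiles := row.filter (fun x => x != 0)
    let merged := merge2048 tiles
    merged ++ List.replicate (row.length - merged.length) 0)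

-- ===== PRECONDITION & SPEC =====
-- Pre_ excludes non-square grids, which are outside the 2048 game's domain: there A
-- (which bounds its row passes by len(grid)) raises IndexError on rows shorter than the
-- grid and leaves longer rows accidentally uncompacted, while B raises ValueError.
def Pre_final_left (grid : List (List Int)) : Prop :=
  ∀ row ∈ grid, row.length = grid.length
instance (grid : List (List Int)) : Decidable (Pre_final_left grid) := by
  unfold Pre_final_left; infer_instance

def pvWitness_final_left : List (List Int) := [[2, 2], [0, 4]]

def Spec_final_left (grid : List (List Int)) (out : List (List Int)) : Prop := out = final_left_alt grid
instance (grid : List (List Int)) (out : List (List Int)) : Decidable (Spec_final_left grid out) := by unfold Spec_final_left; infer_instance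

-- ===== CLAIM (what is proved, stated in full; the proofs are below) =====
def Claim_equal_final_left : Prop := ∀ (grid : List (List Int)), Dom_final_left grid → Pre_final_left grid → Spec_final_left grid (final_left grid)

-- ===== LEMMAS AND PROOFS =====

-- the nonzero tiles of a row, and its fully compacted form
def nzf (xs : List Int) : List Int := xs.filter (fun x => x != 0)
def padded (xs : List Int) : List Int := nzf xs ++ List.replicate (xs.length - (nzf xs).length) 0

theorem onePass_nil (k : Nat) : onePass k [] = [] := by cases k <;> simp [onePass]

theorem onePass_cons2 (k : Nat) (x y : Int) (rest : List Int) :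
    onePass (k + 1) (x :: y :: rest) =
      if x = 0 then y :: onePass k (x :: rest) else x :: onePass k (y :: rest) := rfl

theorem mergePass_cons2 (k : Nat) (x y : Int) (rest : List Int) :
    mergePass (k + 1) (x :: y :: rest) =
      if x = y then (2 * x) :: mergePass k (0 :: rest) else x :: mergePass k (y :: rest) := rfl

theorem onePass_length (k : Nat) (xs : List Int) : (onePass k xs).length = xs.length := by
  induction k generalizing xs with
  | zero => simp [onePass]
  | succ k ih =>
    match xs with
    | [] => simp [onePass]
    | [x] => simp [onePass]
    | x :: y :: rest => rw [onePass_cons2]; split_ifs <;> simp [ih]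

theorem mergePass_length (k : Nat) (xs : List Int) : (mergePass k xs).length = xs.length := by
  induction k generalizing xs with
  | zero => simp [mergePass]
  | succ k ih =>
    match xs with
    | [] => simp [mergePass]
    | [x] => simp [mergePass]
    | x :: y :: rest => rw [mergePass_cons2]; split_ifs <;> simp [ih]

-- zero head: the whole tail slides left, the zero lands at the end
theorem onePass_zero_head (rest : List Int) :
    onePass rest.length (0 :: rest) = rest ++ [0] := by
  induction rest with
  | nil => simp [onePass]
  | cons y r ih => rw [show ((y :: r) : List Int).length = r.length + 1 from rfl,
      onePass_cons2, if_pos rfl, ih]; simp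

-- nonzero head is fixed and the pass continues on the tail
theorem onePass_pos_head (k : Nat) (x : Int) (rest : List Int) (hx : x ≠ 0) :
    onePass (k + 1) (x :: rest) = x :: onePass k rest := by
  match rest with
  | [] => simp [onePass, onePass_nil]
  | y :: r => rw [onePass_cons2, if_neg hx]

-- a trailing zero stays trailing during a pass
theorem onePass_snoc_zero (ys : List Int) :
    onePass ys.length (ys ++ [0]) = onePass (ys.length - 1) ys ++ [0] := by
  induction ys with
  | nil => simp [onePass]
  | cons x ys' ih =>
    show onePass (ys'.length + 1) (x :: (ys' ++ [0])) = onePass (ys'.length + 1 - 1) (x :: ys') ++ [0]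
    rw [Nat.add_sub_cancel]
    by_cases hx : x = 0
    · subst hx
      have h1 : onePass (ys'.length + 1) ((0 : Int) :: (ys' ++ [0])) = (ys' ++ [0]) ++ [0] := by
        have := onePass_zero_head (ys' ++ [0])
        simpa using this
      rw [h1, onePass_zero_head ys']
    · match ys' with
      | [] => simp [onePass, hx]
      | z :: r =>
        rw [onePass_pos_head _ x _ hx]
        show _ = onePass (r.length + 1) (x :: z :: r) ++ [0]
        rw [onePass_pos_head r.length x _ hx]
        have ih' : onePass (r.length + 1) (z :: r ++ [0]) = onePass r.length (z :: r) ++ [0] := by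
          simpa using ih
        rw [show ((z :: r) : List Int).length = r.length + 1 from rfl]
        rw [show ((z :: r) ++ [0] : List Int) = z :: r ++ [0] by simp, ih']
        simp

theorem nzf_cons_zero (rest : List Int) : nzf (0 :: rest) = nzf rest := by simp [nzf]

theorem nzf_cons_pos (x : Int) (rest : List Int) (hx : x ≠ 0) :
    nzf (x :: rest) = x :: nzf rest := by simp [nzf, hx]

theorem nzf_length_le (xs : List Int) : (nzf xs).length ≤ xs.length :=
  List.length_filter_le _ _

theorem padded_nil : padded [] = [] := by simp [padded, nzf]

theorem padded_cons_zero (rest : List Int) : padded (0 :: rest) = padded rest ++ [0] := by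
  have hle := nzf_length_le rest
  simp only [padded, nzf_cons_zero, List.length_cons]
  rw [show rest.length + 1 - (nzf rest).length = (rest.length - (nzf rest).length) + 1 by omega,
    List.replicate_succ', ← List.append_assoc]

theorem padded_cons_pos (x : Int) (rest : List Int) (hx : x ≠ 0) :
    padded (x :: rest) = x :: padded rest := by
  have hle := nzf_length_le rest
  simp only [padded, nzf_cons_pos x rest hx, List.length_cons]
  rw [show rest.length + 1 - ((nzf rest).length + 1) = rest.length - (nzf rest).length by omega]
  simp

theorem padded_length (xs : List Int) : (padded xs).length = xs.length := by
  have := nzf_length_le xs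
  simp only [padded, List.length_append, List.length_replicate]
  omega

theorem nzf_mem_ne (xs : List Int) : ∀ x ∈ nzf xs, x ≠ 0 := by
  intro x hx
  have := List.of_mem_filter hx
  simpa using this

theorem padded_eq_append (xs : List Int) :
    padded xs = nzf xs ++ List.replicate (xs.length - (nzf xs).length) 0 := rfl

-- iterating enough full passes compacts the row
theorem iterPad (row : List Int) : ∀ (j : Nat), row.length - 1 ≤ j →
    (onePass (row.length - 1))^[j] row = padded row := by
  induction row with
  | nil =>
    intro j _
    rw [Function.iterate_fixed (by simp [onePass]), padded_nil]
  | cons x rest ih =>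
    match rest with
    | [] =>
      intro j _
      rw [show (([x] : List Int).length - 1) = 0 from rfl,
        Function.iterate_fixed (by simp [onePass])]
      by_cases hx : x = 0
      · subst hx; rw [padded_cons_zero, padded_nil]; simp
      · rw [padded_cons_pos x [] hx, padded_nil]
    | y :: r =>
      intro j hj
      obtain ⟨j', rfl⟩ : ∃ j', j = j' + 1 := by
        refine ⟨j - 1, ?_⟩
        simp at hj; omega
      have hj' : ((y :: r) : List Int).length - 1 ≤ j' := by simp at hj ⊢; omega
      by_cases hx : x = 0
      · subst hx
        show (onePass (r.length + 1))^[j' + 1] (0 :: y :: r) = padded (0 :: y :: r)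
        rw [Function.iterate_succ_apply]
        have hzh : onePass (r.length + 1) ((0 : Int) :: y :: r) = (y :: r) ++ [0] := by
          simpa using onePass_zero_head (y :: r)
        rw [hzh]
        -- push the trailing zero through the remaining passes
        have push : ∀ (i : Nat) (ys : List Int), ys.length = r.length + 1 →
            (onePass (r.length + 1))^[i] (ys ++ [0]) = (onePass r.length)^[i] ys ++ [0] := by
          intro i
          induction i with
          | zero => intro ys _; simp
          | succ i ihi =>
            intro ys hys
            rw [Function.iterate_succ_apply, Function.iterate_succ_apply]
            have hsz : onePass (r.length + 1) (ys ++ [0]) = onePass r.length ys ++ [0] := by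
              have := onePass_snoc_zero ys
              rw [hys] at this
              simpa [hys] using this
            rw [hsz, ihi _ (by rw [onePass_length, hys])]
        rw [push j' (y :: r) rfl]
        have ihres : (onePass r.length)^[j'] (y :: r) = padded (y :: r) := by
          simpa using ih j' hj'
        rw [ihres, padded_cons_zero]
      · show (onePass (r.length + 1))^[j' + 1] (x :: y :: r) = padded (x :: y :: r)
        -- the nonzero head stays put; the passes act on the tail
        have lift : ∀ (i : Nat) (ys : List Int),
            (onePass (r.length + 1))^[i] (x :: ys) = x :: (onePass r.length)^[i] ys := by
          intro i
          induction i with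
          | zero => intro ys; simp
          | succ i ihi =>
            intro ys
            rw [Function.iterate_succ_apply, Function.iterate_succ_apply,
              onePass_pos_head _ x _ hx, ihi]
        rw [lift (j' + 1) (y :: r)]
        have ihres : (onePass r.length)^[j' + 1] (y :: r) = padded (y :: r) := by
          simpa using ih (j' + 1) (by simp at hj' ⊢; omega)
        rw [ihres, padded_cons_pos x _ hx]

theorem mergePass_zeros (k m : Nat) : mergePass k (List.replicate m 0) = List.replicate m 0 := by
  induction k generalizing m with
  | zero => simp [mergePass]
  | succ k ih =>
    match m with
    | 0 => simp [mergePass]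
    | 1 => simp [mergePass, List.replicate]
    | m' + 2 =>
      have h : List.replicate (m' + 2) (0 : Int) = 0 :: 0 :: List.replicate m' 0 := by
        simp [List.replicate_succ]
      have h2 : (0 : Int) :: List.replicate m' 0 = List.replicate (m' + 1) 0 := by
        simp [List.replicate_succ]
      rw [h, mergePass_cons2, if_pos rfl, h2, ih (m' + 1), ← h2]
      norm_num

-- the nonzeros of A's merge pass on a compacted row are exactly B's merged tiles
theorem nzf_mergePass (N : Nat) : ∀ (c : List Int) (m f : Nat), c.length ≤ N →
    f = c.length + m - 1 → (∀ x ∈ c, x ≠ 0) →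
    nzf (mergePass f (c ++ List.replicate m 0)) = merge2048 c := by
  induction N with
  | zero =>
    intro c m f hN _ _
    have : c = [] := List.eq_nil_of_length_eq_zero (Nat.le_zero.mp hN)
    subst this
    simp [mergePass_zeros, merge2048, nzf]
  | succ N ih =>
    intro c m f hN hf hc
    match c with
    | [] => simp [mergePass_zeros, merge2048, nzf]
    | [a] =>
      have ha : a ≠ 0 := hc a (by simp)
      match m with
      | 0 =>
        subst hf
        simp [mergePass, merge2048, nzf, ha]
      | m' + 1 =>
        have hL : (([a] : List Int)).length = 1 := by simp
        obtain ⟨f', rfl⟩ : ∃ f', f = f' + 1 := ⟨m', by rw [hL] at hf; omega⟩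
        have hfm : f' = m' := by rw [hL] at hf; omega
        rw [hfm]
        have harg : ([a] : List Int) ++ List.replicate (m' + 1) 0 =
            a :: 0 :: List.replicate m' 0 := by simp [List.replicate_succ]
        rw [harg, mergePass_cons2, if_neg ha]
        have h2 : (0 : Int) :: List.replicate m' 0 = List.replicate (m' + 1) 0 := by
          simp [List.replicate_succ]
        rw [h2, mergePass_zeros]
        simp [nzf, merge2048, ha]
    | a :: b :: c' =>
      have ha : a ≠ 0 := hc a (by simp)
      have hc'' : ∀ x ∈ b :: c', x ≠ 0 := fun x hx => hc x (by simp at hx ⊢; tauto)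
      have hL : ((a :: b :: c') : List Int).length = c'.length + 2 := by simp
      obtain ⟨f', rfl⟩ : ∃ f', f = f' + 1 := ⟨c'.length + m, by rw [hL] at hf; omega⟩
      have hf' : f' = c'.length + m := by rw [hL] at hf; omega
      have harg : ((a :: b :: c') : List Int) ++ List.replicate m 0 =
          a :: b :: (c' ++ List.replicate m 0) := by simp
      rw [harg, mergePass_cons2]
      by_cases hab : a = b
      · subst hab
        rw [if_pos rfl]
        match c' with
        | [] =>
          have h2 : (0 : Int) :: ([] ++ List.replicate m 0) = List.replicate (m + 1) 0 := by
            simp [List.replicate_succ]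
          rw [h2, mergePass_zeros]
          have h2a : (2 : Int) * a ≠ 0 := fun h => ha (by omega)
          simp [nzf, merge2048, h2a]
        | d :: c'' =>
          have hd : d ≠ 0 := hc'' d (by simp)
          have hdne : (0 : Int) ≠ d := fun h => hd h.symm
          obtain ⟨f'', rfl⟩ : ∃ f'', f' = f'' + 1 := ⟨c''.length + m, by
            have h1 : ((d :: c'') : List Int).length = c''.length + 1 := by simp
            rw [h1] at hf'; omega⟩
          rw [show ((0 : Int) :: (d :: c'' ++ List.replicate m 0)) =
              0 :: d :: (c'' ++ List.replicate m 0) by simp, mergePass_cons2, if_neg hdne]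
          have h2a : (2 : Int) * a ≠ 0 := fun h => ha (by omega)
          have hrec : nzf (mergePass f'' (d :: (c'' ++ List.replicate m 0))) =
              merge2048 (d :: c'') := by
            have harg2 : ((d :: c'') : List Int) ++ List.replicate m 0 =
                d :: (c'' ++ List.replicate m 0) := by simp
            rw [← harg2]
            refine ih (d :: c'') m f'' (by simp at hN ⊢; omega) ?_
              (fun x hx => hc'' x (by simp [hx]))
            have h1 : ((d :: c'') : List Int).length = c''.length + 1 := by simp
            rw [h1] at hf' ⊢; omega
          rw [show nzf ((2 * a) :: 0 :: mergePass f'' (d :: (c'' ++ List.replicate m 0))) =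
              (2 * a) :: nzf (mergePass f'' (d :: (c'' ++ List.replicate m 0))) from by
            simp [nzf, h2a], hrec]
          simp [merge2048]
      · rw [if_neg hab]
        have hrec : nzf (mergePass f' (b :: (c' ++ List.replicate m 0))) =
            merge2048 (b :: c') := by
          have harg2 : ((b :: c') : List Int) ++ List.replicate m 0 =
              b :: (c' ++ List.replicate m 0) := by simp
          rw [← harg2]
          refine ih (b :: c') m f' (by simp at hN ⊢; omega) ?_ hc''
          have h1 : ((b :: c') : List Int).length = c'.length + 1 := by simp
          rw [h1]; omega
        rw [show nzf (a :: mergePass f' (b :: (c' ++ List.replicate m 0))) =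
            a :: nzf (mergePass f' (b :: (c' ++ List.replicate m 0))) from by
          simp [nzf, ha], hrec]
        simp [merge2048, hab]

-- the grid-level shift loop is an iterate of the row pass
theorem foldl_shift (k : Nat) (g : List (List Int)) :
    (List.range k).foldl (fun h _ => shift_left h) g =
      g.map (fun row => (onePass (g.length - 1))^[k] row) := by
  induction k with
  | zero => simp
  | succ k ih =>
    rw [List.range_succ, List.foldl_append, ih]
    simp only [List.foldl_cons, List.foldl_nil, shift_left, List.length_map, List.map_map]
    apply List.map_congr_left
    intro row _
    simp [Function.iterate_succ_apply']

theorem final_left_spec_aux (grid : List (List Int)) (hsq : Pre_final_left grid) :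
    final_left grid = final_left_alt grid := by
  simp only [final_left, final_left_alt, foldl_shift, List.length_map, List.map_map]
  apply List.map_congr_left
  intro row hrow
  have hlen : row.length = grid.length := hsq row hrow
  simp only [Function.comp]
  rw [← hlen]
  rw [iterPad row row.length (by omega)]
  have h1 : (padded row).length = row.length := padded_length row
  rw [h1]
  set r2 := mergePass (row.length - 1) (padded row) with hr2
  have h2 : r2.length = row.length := by rw [hr2, mergePass_length, h1]
  rw [← h2]
  rw [iterPad r2 r2.length (by omega)]
  have h3 : nzf r2 = merge2048 (nzf row) := by
    rw [hr2, padded_eq_append]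
    have hle := nzf_length_le row
    exact nzf_mergePass (nzf row).length (nzf row) _ _ le_rfl (by omega) (nzf_mem_ne row)
  rw [padded_eq_append, h3, h2]
  rfl

-- ===== VERDICT (by name: the statement is the Claim_ definition above) =====
theorem final_left_spec : Claim_equal_final_left := by
  intro grid _ hpre
  exact final_left_spec_aux grid hpre
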